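-- pv_equiv track=rewrite | github.com/c-er/synchronous-model-checking | automata.py | all_labels
-- ===== SOURCE A (Python) =====
-- def all_alpha_tups(alpha, len):
--     if len == 0:
--         return [()]
--     else:
--         S = all_alpha_tups(alpha, len - 1)
--         L = []
--         for u in S:
--             for a in alpha:
--                 L.append((a,) + u)
--         return L
--
-- def all_labels(vars, alpha):
--     L = all_alpha_tups(alpha, len(vars))
--     S = []
--     for t in L:
--         d = {}
--         cnt = 0
--         for v in vars:
--             d[v] = t[cnt]
--             cnt += 1
--         S.append(d)
--     return S
-- ===== SOURCE B (Python) =====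
-- def all_labels(vs, alpha):
--     n, k = len(vs), len(alpha)
--     out = []
--     for idx in range(k ** n):
--         d = {}
--         for i, v in enumerate(vs):
--             d[v] = alpha[idx // k ** i % k]
--         out.append(d)
--     return out
-- ===== Notes on version B (the rewrite author's own statement) =====
-- stated objective: alternative
-- what changed: Replaces the recursive tuple-enumeration helper by a single closed-form loop over range(len(alpha)**len(vars)), decoding each index into its base-k digits (digit i chooses the symbol for vars[i]) so no intermediate tuple list is built.
import Mathlib
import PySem

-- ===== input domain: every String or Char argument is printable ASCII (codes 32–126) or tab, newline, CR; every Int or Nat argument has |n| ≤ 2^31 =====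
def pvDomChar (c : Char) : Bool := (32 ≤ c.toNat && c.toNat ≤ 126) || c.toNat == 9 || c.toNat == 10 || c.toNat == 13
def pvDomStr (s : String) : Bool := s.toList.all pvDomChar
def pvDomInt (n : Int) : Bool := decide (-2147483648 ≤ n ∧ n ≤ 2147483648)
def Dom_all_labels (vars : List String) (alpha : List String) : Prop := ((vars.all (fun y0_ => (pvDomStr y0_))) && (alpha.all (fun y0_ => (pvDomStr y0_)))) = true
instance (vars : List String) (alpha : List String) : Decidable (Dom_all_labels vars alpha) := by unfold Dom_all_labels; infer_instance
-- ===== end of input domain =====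

-- B replaces the recursive tuple-enumeration helper by one loop over range(k^n) that
-- decodes each index into base-k digits (alternative decomposition; same asymptotic cost).


-- ===== PORT A =====
-- helper all_alpha_tups: only ever called with len = len(vars) ≥ 0, so Nat recursion is exact
def all_alpha_tups (alpha : List String) : Nat → List (List String)
  | 0 => [[]]
  | n + 1 => (all_alpha_tups alpha n).flatMap (fun u => alpha.map (fun a => a :: u))

-- t[cnt] is always in range (every tuple has length len(vars) and cnt < len(vars)),
-- so getD's default "" is never reached and matches Python's t[cnt] exactly.
def all_labels (vars : List String) (alpha : List String) : List (List (String × String)) :=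
  (all_alpha_tups alpha vars.length).map (fun t =>
    ((vars.foldl (fun (p : PySem.Dict String String × Nat) v =>
        (p.1.insert v (t.getD p.2 ""), p.2 + 1)) (PySem.Dict.empty, 0)).1).items)

-- ===== PORT B =====
-- enumerate(vars) ported as List.zipIdx (indices are the Nats 0..n-1, exact here);
-- alpha[idx // k**i % k] is always in range when the loop body runs (the digit < k), so getD is exact.
def all_labels_alt (vars : List String) (alpha : List String) : List (List (String × String)) :=
  let n := vars.length
  let k := alpha.length
  (List.range (k ^ n)).map (fun idx =>
    (vars.zipIdx.foldl (fun (d : PySem.Dict String String) p =>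
        d.insert p.1 (alpha.getD (idx / k ^ p.2 % k) "")) PySem.Dict.empty).items)

-- ===== PRECONDITION & SPEC =====
def Spec_all_labels (vars : List String) (alpha : List String) (out : List (List (String × String))) : Prop := out = all_labels_alt vars alpha
instance (vars : List String) (alpha : List String) (out : List (List (String × String))) : Decidable (Spec_all_labels vars alpha out) := by unfold Spec_all_labels; infer_instance

-- ===== CLAIM (what is proved, stated in full; the proofs are below) =====
def Claim_equal_all_labels : Prop := ∀ (vars : List String) (alpha : List String), Dom_all_labels vars alpha → Spec_all_labels vars alpha (all_labels vars alpha)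

-- ===== LEMMAS AND PROOFS =====

theorem map_eq_range_getD {α β : Type} (l : List α) (d : α) (g : α → β) :
    l.map g = (List.range l.length).map (fun j => g (l.getD j d)) := by
  apply List.ext_getElem
  · simp
  · intro i h1 h2
    simp only [List.getElem_map, List.getElem_range]
    rw [List.getD_eq_getElem _ _ (by simpa using h1)]

theorem range_mul_flatMap (a b : Nat) :
    List.range (a * b) = (List.range a).flatMap (fun q => (List.range b).map (fun j => q * b + j)) := by
  induction a with
  | zero => simp
  | succ a ih =>
    rw [List.range_succ, List.flatMap_append, ← ih, Nat.succ_mul, List.range_add]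
    simp

-- digit characterization of A's tuple list
theorem all_alpha_tups_eq_range (alpha : List String) (n : Nat) :
    all_alpha_tups alpha n =
      (List.range (alpha.length ^ n)).map (fun idx =>
        (List.range n).map (fun i => alpha.getD (idx / alpha.length ^ i % alpha.length) "")) := by
  induction n with
  | zero => simp [all_alpha_tups]
  | succ n ih =>
    set k := alpha.length with hk
    rw [all_alpha_tups, ih, pow_succ, range_mul_flatMap, List.flatMap_map, List.map_flatMap]
    congr 1
    funext q
    rw [map_eq_range_getD alpha "" (fun a => a :: (List.range n).map (fun i => alpha.getD (q / k ^ i % k) "")), ← hk, List.map_map]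
    apply List.map_congr_left
    intro j hj
    simp only [List.mem_range] at hj
    have hk0 : 0 < k := Nat.pos_of_ne_zero (by omega)
    simp only [Function.comp]
    rw [List.range_succ_eq_map, List.map_cons, List.map_map]
    congr 1
    · congr 1
      rw [pow_zero, Nat.div_one, Nat.mul_comm q k, Nat.mul_add_mod, Nat.mod_eq_of_lt hj]
    · apply List.map_congr_left
      intro i _
      simp only [Function.comp]
      congr 2
      rw [pow_succ, Nat.mul_comm (k ^ i) k, ← Nat.div_div_eq_div_mul, Nat.mul_comm q k,
        Nat.mul_add_div hk0, Nat.div_eq_of_lt hj, Nat.add_zero]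

-- A's counter fold over vars equals B's zipIdx fold, whenever t's entries agree with g below the touched indices
theorem fold_counter_eq_zipIdx (t : List String) (g : Nat → String) :
    ∀ (vs : List String) (c : Nat) (d : PySem.Dict String String),
      (∀ m, m < c + vs.length → t.getD m "" = g m) →
      (vs.foldl (fun (p : PySem.Dict String String × Nat) v =>
          (p.1.insert v (t.getD p.2 ""), p.2 + 1)) (d, c)).1
        = (vs.zipIdx c).foldl (fun d p => d.insert p.1 (g p.2)) d := by
  intro vs
  induction vs with
  | nil => intro c d _; simp
  | cons v vs ih =>
    intro c d h
    simp only [List.foldl_cons, List.zipIdx_cons]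
    rw [h c (by simp)]
    exact ih (c + 1) _ (fun m hm => h m (by simp at hm ⊢; omega))

-- ===== VERDICT (by name: the statement is the Claim_ definition above) =====
theorem all_labels_spec : Claim_equal_all_labels := by
  intro vars alpha _
  unfold Spec_all_labels all_labels all_labels_alt
  rw [all_alpha_tups_eq_range, List.map_map]
  apply List.map_congr_left
  intro idx _
  simp only [Function.comp]
  congr 1
  exact fold_counter_eq_zipIdx _ (fun i => alpha.getD (idx / alpha.length ^ i % alpha.length) "") vars 0 PySem.Dict.empty (by
    intro m hm
    rw [List.getD_eq_getElem _ _ (by simpa using hm)]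
    simp)
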